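-- pv_equiv track=rewrite | github.com/zevaryx/adventofcode | 2015/day10/solve.py | do_loop
-- ===== SOURCE A (Python) =====
-- inp = "3113322113"
--
-- def do_loop(src, count=40):
--     inp = src
--     outp = ""
--     for _ in range(count):
--         idx = 0
--         for i in range(len(inp)):
--             if i < idx:
--                 continue
--             counter = 0
--             while inp[i] == inp[idx]:
--                 counter += 1
--                 idx += 1
--                 if idx == len(inp):
--                     break
--             outp += f"{counter}{inp[i]}"
--         inp = outp
--         outp = ""
--     return inp
-- ===== SOURCE B (Python) =====
-- def do_loop(src, count=40):
--     s = src
--     for _ in range(count):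
--         n = len(s)
--         cuts = [i for i in range(n + 1) if i == 0 or i == n or s[i] != s[i - 1]]
--         s = "".join(f"{b - a}{s[a]}" for a, b in zip(cuts, cuts[1:]))
--     return s
-- ===== Notes on version B (the rewrite author's own statement) =====
-- stated objective: alternative
-- what changed: Each round is computed in two staged passes over a different data structure: first the list of run-boundary cut indices (i==0, i==n, or s[i]!=s[i-1]) is built, then the output is emitted from consecutive cut pairs (b-a, s[a]) via join, instead of A's single scan with a manual index-skipping run counter and string concatenation.
import Mathlib
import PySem

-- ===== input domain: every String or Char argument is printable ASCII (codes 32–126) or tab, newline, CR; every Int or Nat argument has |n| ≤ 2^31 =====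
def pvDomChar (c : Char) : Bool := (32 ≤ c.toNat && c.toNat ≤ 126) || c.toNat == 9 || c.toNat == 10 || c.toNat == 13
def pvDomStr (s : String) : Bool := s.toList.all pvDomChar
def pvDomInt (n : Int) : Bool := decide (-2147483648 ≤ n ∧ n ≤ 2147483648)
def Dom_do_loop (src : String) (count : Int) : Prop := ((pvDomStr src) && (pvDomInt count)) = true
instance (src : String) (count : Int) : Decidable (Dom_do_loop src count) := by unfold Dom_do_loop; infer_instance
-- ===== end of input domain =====

-- B computes each round in two staged passes — build the list of run-boundary cut indices, then emit (b-a, s[a]) for consecutive cut pairs — instead of A's single scan with a manual index-skipping run counter; return value identical.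

-- ===== PORT A =====
-- the inner `while inp[i] == inp[idx]: counter += 1; idx += 1; if idx == len(inp): break`
-- (at Python's check idx is always in range, since the loop breaks as soon as idx reaches len)
def pvCountRun (inp : List Char) (c : Char) (idx counter : Nat) : Nat × Nat :=
  if h : idx < inp.length ∧ inp[idx]? = some c then
    pvCountRun inp c (idx + 1) (counter + 1)
  else (counter, idx)
termination_by inp.length - idx
decreasing_by omega

-- one iteration of the outer loop: `for i in range(len(inp)): if i < idx: continue; …`
def pvStepA (inp : List Char) : List Char :=
  ((List.range inp.length).foldl
    (fun (st : Nat × List Char) i =>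
      if i < st.1 then st
      else
        match inp[i]? with
        | some c =>
            let r := pvCountRun inp c st.1 0
            (r.2, st.2 ++ (PySem.Int.toStr (r.1 : Int)).toList ++ [c])
        | none => st)
    (0, [])).2

def do_loop (src : String) (count : Int) : String :=
  String.ofList ((PySem.List.pyRange 0 count 1).foldl (fun inp _ => pvStepA inp) src.toList)

-- ===== PORT B =====
-- one round of Source B: cuts = [i for i in range(n+1) if i == 0 or i == n or s[i] != s[i-1]];
-- "".join(f"{b-a}{s[a]}" for a, b in zip(cuts, cuts[1:])).
-- s[a] is ported via getElem? (a is a cut index below the last cut, hence always in range in Python).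
def pvStepB (s : List Char) : List Char :=
  let n := s.length
  let cuts := (List.range (n + 1)).filter (fun i => i == 0 || i == n || !(s[i]? == s[i - 1]?))
  (cuts.zip cuts.tail).flatMap (fun p =>
    (PySem.Int.toStr ((p.2 : Int) - (p.1 : Int))).toList ++ ((s[p.1]?).map (fun c => [c])).getD [])

def do_loop_alt (src : String) (count : Int) : String :=
  String.ofList ((PySem.List.pyRange 0 count 1).foldl (fun s _ => pvStepB s) src.toList)

-- ===== PRECONDITION & SPEC =====
def Spec_do_loop (src : String) (count : Int) (out : String) : Prop := out = do_loop_alt src count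
instance (src : String) (count : Int) (out : String) : Decidable (Spec_do_loop src count out) := by unfold Spec_do_loop; infer_instance

-- ===== CLAIM (what is proved, stated in full; the proofs are below) =====
def Claim_equal_do_loop : Prop := ∀ (src : String) (count : Int), Dom_do_loop src count → Spec_do_loop src count (do_loop src count)

-- ===== LEMMAS AND PROOFS =====

-- proof helper: length and remainder of the leading run of c
def pvTakeRun (c : Char) : List Char → Nat × List Char
  | [] => (0, [])
  | x :: xs => if x = c then let r := pvTakeRun c xs; (r.1 + 1, r.2) else (0, x :: xs)

theorem pvTakeRun_decomp (c : Char) (l : List Char) :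
    l = List.replicate (pvTakeRun c l).1 c ++ (pvTakeRun c l).2 := by
  induction l with
  | nil => simp [pvTakeRun]
  | cons x xs ih =>
    simp only [pvTakeRun]
    split
    · next h => subst h; simpa [List.replicate_succ] using ih
    · simp

theorem pvTakeRun_head (c : Char) (l : List Char) :
    (pvTakeRun c l).2.head? ≠ some c := by
  induction l with
  | nil => simp [pvTakeRun]
  | cons x xs ih =>
    simp only [pvTakeRun]
    split
    · simpa using ih
    · next h => simp [h]

theorem pvTakeRun_drop (c : Char) (l : List Char) :
    (pvTakeRun c l).2 = l.drop (pvTakeRun c l).1 := by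
  induction l with
  | nil => simp [pvTakeRun]
  | cons x xs ih =>
    simp only [pvTakeRun]
    split
    · simpa using ih
    · simp

theorem pvTakeRun_le (c : Char) (l : List Char) : (pvTakeRun c l).1 ≤ l.length := by
  induction l with
  | nil => simp [pvTakeRun]
  | cons x xs ih =>
    simp only [pvTakeRun]
    split
    · simpa using Nat.succ_le_succ ih
    · simp

-- pvCountRun counts exactly the leading run of c in inp.drop idx
theorem pvCountRun_spec_aux (inp : List Char) (c : Char) :
    ∀ d idx counter, inp.length - idx ≤ d →
    pvCountRun inp c idx counter =
      (counter + (pvTakeRun c (inp.drop idx)).1, idx + (pvTakeRun c (inp.drop idx)).1) := by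
  intro d
  induction d with
  | zero =>
    intro idx counter hle
    have hn : ¬(idx < inp.length ∧ inp[idx]? = some c) := by
      intro ⟨h1, _⟩; omega
    rw [pvCountRun, dif_neg hn, List.drop_of_length_le (by omega)]
    simp [pvTakeRun]
  | succ d ih =>
    intro idx counter hle
    rw [pvCountRun]
    split_ifs with h
    · obtain ⟨hlt, hget⟩ := h
      have hc : inp[idx] = c := by
        rw [List.getElem?_eq_getElem hlt] at hget
        exact Option.some.inj hget
      have hd : inp.drop idx = c :: inp.drop (idx + 1) := by
        rw [List.drop_eq_getElem_cons hlt, hc]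
      rw [ih (idx + 1) (counter + 1) (by omega), hd]
      simp [pvTakeRun]
      omega
    · by_cases hlt : idx < inp.length
      · have hget : inp[idx]? = some inp[idx] := List.getElem?_eq_getElem hlt
        have hne : inp[idx] ≠ c := fun he => h ⟨hlt, by rw [hget, he]⟩
        rw [List.drop_eq_getElem_cons hlt]
        simp [pvTakeRun, hne]
      · rw [List.drop_of_length_le (by omega)]
        simp [pvTakeRun]

theorem pvCountRun_spec (inp : List Char) (c : Char) (idx counter : Nat) :
    pvCountRun inp c idx counter =
      (counter + (pvTakeRun c (inp.drop idx)).1, idx + (pvTakeRun c (inp.drop idx)).1) :=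
  pvCountRun_spec_aux inp c (inp.length - idx) idx counter (Nat.le_refl _)

-- the cut predicate of pvStepB
def pvCut (s : List Char) (i : Nat) : Bool :=
  i == 0 || i == s.length || !(s[i]? == s[i - 1]?)

def pvCuts (s : List Char) : List Nat := (List.range (s.length + 1)).filter (pvCut s)

-- shifting the cuts past the first run: cuts (run ++ t) = 0 :: (cuts t).map (+k)
theorem pvCuts_shift (c : Char) (k : Nat) (t : List Char) (hk : 1 ≤ k)
    (ht : t.head? ≠ some c) :
    pvCuts (List.replicate k c ++ t) = 0 :: (pvCuts t).map (· + k) := by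
  set s := List.replicate k c ++ t with hsdef
  have hn : s.length = k + t.length := by simp [hsdef]
  have hlt : ∀ j, j < k → s[j]? = some c := by
    intro j hj
    rw [hsdef, List.getElem?_append_left (by simpa using hj)]
    simp [hj]
  have hge : ∀ j, s[k + j]? = t[j]? := by
    intro j
    rw [hsdef, List.getElem?_append_right (by simp)]
    simp
  have hsplit : List.range (s.length + 1) = List.range' 0 k ++ List.range' k (t.length + 1) := by
    rw [List.range_eq_range']
    have h1 := List.range'_append (s := 0) (m := k) (n := t.length + 1) (step := 1)
    simp only [Nat.one_mul, Nat.zero_add] at h1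
    rw [show s.length + 1 = k + (t.length + 1) by omega]
    exact h1.symm
  have hfirst : (List.range' 0 k).filter (pvCut s) = [0] := by
    rw [show k = (k - 1) + 1 by omega, List.range'_succ, List.filter_cons]
    have h0 : pvCut s 0 = true := by simp [pvCut]
    rw [if_pos h0]
    have hnil : (List.range' 1 (k - 1)).filter (pvCut s) = [] := by
      rw [List.filter_eq_nil_iff]
      intro i hi
      rw [List.mem_range'_1] at hi
      have hi1 : 1 ≤ i := hi.1
      have hi2 : i < k := by omega
      simp only [pvCut, hlt i hi2, hlt (i - 1) (by omega), beq_self_eq_true,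
        Bool.not_true, Bool.or_false, Bool.or_eq_true, beq_iff_eq, hn]
      omega
    rw [hnil]
  have hsecond : (List.range' k (t.length + 1)).filter (pvCut s) =
      ((List.range (t.length + 1)).filter (pvCut t)).map (· + k) := by
    have hmap : List.range' k (t.length + 1) = (List.range (t.length + 1)).map (k + ·) := by
      rw [List.range'_eq_map_range]
    rw [hmap, List.filter_map]
    have hcong : (List.range (t.length + 1)).filter (pvCut s ∘ (k + ·)) =
        (List.range (t.length + 1)).filter (pvCut t) := by
      apply List.filter_congr
      intro i hi
      rw [List.mem_range] at hi
      simp only [Function.comp_apply]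
      rcases Nat.eq_zero_or_pos i with h0 | h1
      · subst h0
        have ht0 : pvCut t 0 = true := by simp [pvCut]
        rw [ht0]
        rcases Nat.eq_zero_or_pos t.length with hm | hm
        · simp [pvCut, hn, hm]
        · have hget0 : s[k + 0]? = t[0]? := hge 0
          have ht0' : t[0]? = some t[0] := List.getElem?_eq_getElem hm
          have htne : t[0] ≠ c := by
            intro he
            apply ht
            rw [List.head?_eq_getElem?, ht0', he]
          simp only [pvCut, Nat.add_zero] at hget0 ⊢
          have hk1 : s[k - 1]? = some c := hlt (k - 1) (by omega)
          rw [hget0, ht0', hk1]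
          simp [htne]
      · have hg1 : s[k + i]? = t[i]? := hge i
        have hg2 : s[k + i - 1]? = t[i - 1]? := by
          rw [show k + i - 1 = k + (i - 1) by omega]
          exact hge (i - 1)
        have e0 : (k + i == 0) = false := by simp; omega
        have e1 : (i == 0) = false := by simp; omega
        have e2 : (k + i == k + t.length) = (i == t.length) := by
          rcases eq_or_ne i t.length with h | h
          · simp [h]
          · simp [h]
        simp only [pvCut, hg1, hg2, hn, e0, e1, e2]
    rw [hcong]
    apply List.map_congr_left
    intro i _
    omega
  rw [pvCuts, pvCuts, hsplit, List.filter_append, hfirst, hsecond]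
  rfl

theorem pvCuts_head (t : List Char) : ∃ T, pvCuts t = 0 :: T := by
  refine ⟨((List.range t.length).map Nat.succ).filter (pvCut t), ?_⟩
  rw [pvCuts, List.range_succ_eq_map, List.filter_cons]
  simp [pvCut]

theorem pvStepB_eq (s : List Char) : pvStepB s =
    ((pvCuts s).zip (pvCuts s).tail).flatMap (fun p =>
      (PySem.Int.toStr ((p.2 : Int) - (p.1 : Int))).toList ++
        ((s[p.1]?).map (fun c => [c])).getD []) := rfl

-- zipped cut pairs shifted by k emit the same output read from the suffix t
theorem pvZipShift (k : Nat) (s t : List Char)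
    (hidx : ∀ j, s[j + k]? = t[j]?) :
    ∀ (L : List Nat) (hd : Nat),
    (((hd + k) :: L.map (· + k)).zip (L.map (· + k))).flatMap (fun p =>
      (PySem.Int.toStr ((p.2 : Int) - (p.1 : Int))).toList ++
        ((s[p.1]?).map (fun c => [c])).getD []) =
    ((hd :: L).zip L).flatMap (fun p =>
      (PySem.Int.toStr ((p.2 : Int) - (p.1 : Int))).toList ++
        ((t[p.1]?).map (fun c => [c])).getD []) := by
  intro L
  induction L with
  | nil => intro hd; rfl
  | cons x L' ih =>
    intro hd
    simp only [List.map_cons, List.zip_cons_cons, List.flatMap_cons, ih x]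
    rw [hidx hd, show ((x + k : Nat) : Int) - ((hd + k : Nat) : Int) = (x : Int) - (hd : Int) by
      push_cast; ring]

-- unfolding pvStepB over the first run
theorem pvStepB_cons (c : Char) (rest : List Char) :
    pvStepB (c :: rest) =
      (PySem.Int.toStr (((pvTakeRun c rest).1 + 1 : Nat) : Int)).toList ++ [c] ++
        pvStepB (pvTakeRun c rest).2 := by
  set k := (pvTakeRun c rest).1 + 1 with hkdef
  set t := (pvTakeRun c rest).2 with htdef
  have hs : c :: rest = List.replicate k c ++ t := by
    rw [hkdef, List.replicate_succ]
    simpa using congrArg (c :: ·) (pvTakeRun_decomp c rest)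
  have hk1 : 1 ≤ k := by omega
  have hhead : t.head? ≠ some c := pvTakeRun_head c rest
  obtain ⟨T, hT⟩ := pvCuts_head t
  have hshift := pvCuts_shift c k t hk1 hhead
  have hhd : (List.replicate k c ++ t)[0]? = some c := by
    rw [show k = (k - 1) + 1 by omega, List.replicate_succ]
    rfl
  have hidx : ∀ j, (List.replicate k c ++ t)[j + k]? = t[j]? := by
    intro j
    rw [List.getElem?_append_right (by simp)]
    simp
  have hzs := pvZipShift k (List.replicate k c ++ t) t hidx T 0
  simp only [Nat.zero_add] at hzs
  rw [hs, pvStepB_eq, pvStepB_eq, hshift, hT]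
  simp only [List.map_cons, Nat.zero_add, List.tail_cons, List.zip_cons_cons,
    List.flatMap_cons]
  rw [hzs]
  simp [hhd]

-- skipping: indices below idx leave the state unchanged
theorem pvFold_skip (inp : List Char) (a m : Nat) (st : Nat × List Char) (h : a + m ≤ st.1) :
    (List.range' a m).foldl
      (fun (st : Nat × List Char) i =>
        if i < st.1 then st
        else
          match inp[i]? with
          | some c =>
              let r := pvCountRun inp c st.1 0
              (r.2, st.2 ++ (PySem.Int.toStr (r.1 : Int)).toList ++ [c])
          | none => st)
      st = st := by
  induction m generalizing a with
  | zero => rfl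
  | succ m ih =>
    rw [List.range'_succ, List.foldl_cons, if_pos (by omega)]
    exact ih (a + 1) (by omega)

-- main invariant of A's inner pass
theorem pvFold_main (inp : List Char) : ∀ d k outp, d = inp.length - k → k ≤ inp.length →
    (List.range' k (inp.length - k)).foldl
      (fun (st : Nat × List Char) i =>
        if i < st.1 then st
        else
          match inp[i]? with
          | some c =>
              let r := pvCountRun inp c st.1 0
              (r.2, st.2 ++ (PySem.Int.toStr (r.1 : Int)).toList ++ [c])
          | none => st)
      (k, outp) = (inp.length, outp ++ pvStepB (inp.drop k)) := by
  intro d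
  induction d using Nat.strong_induction_on with
  | _ d ih =>
    intro k outp hd hk
    rcases Nat.eq_or_lt_of_le hk with heq | hlt
    · subst heq
      simp [show pvStepB [] = [] from rfl]
    · have hcons : List.range' k (inp.length - k) =
          k :: List.range' (k + 1) (inp.length - k - 1) := by
        have h2 : inp.length - k = (inp.length - k - 1) + 1 := by omega
        rw [h2, List.range'_succ]
        simp
      rw [hcons, List.foldl_cons, if_neg (by omega)]
      have hget : inp[k]? = some inp[k] := List.getElem?_eq_getElem hlt
      rw [hget]
      set c := inp[k] with hc
      set s := (pvTakeRun c (inp.drop (k + 1))).1 with hs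
      have hdk : inp.drop k = c :: inp.drop (k + 1) := List.drop_eq_getElem_cons hlt
      have hrun : pvCountRun inp c k 0 = (s + 1, k + (s + 1)) := by
        rw [pvCountRun_spec, hdk]
        simp [pvTakeRun]
        omega
      have hsle : s ≤ inp.length - k - 1 := by
        have := pvTakeRun_le c (inp.drop (k + 1))
        simp at this; omega
      simp only [hrun]
      have hsplit : List.range' (k + 1) (inp.length - k - 1) =
          List.range' (k + 1) s ++ List.range' (k + 1 + s) (inp.length - (k + 1 + s)) := by
        have h1 := List.range'_append (s := k + 1) (m := s) (n := inp.length - (k + 1 + s)) (step := 1)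
        simp only [Nat.one_mul] at h1
        rw [show s + (inp.length - (k + 1 + s)) = inp.length - k - 1 by omega] at h1
        exact h1.symm
      rw [hsplit, List.foldl_append]
      rw [pvFold_skip inp (k + 1) s _ (by simp; omega)]
      have hrec := ih (inp.length - (k + 1 + s)) (by omega) (k + 1 + s)
        (outp ++ (PySem.Int.toStr ((s + 1 : Nat) : Int)).toList ++ [c]) rfl (by omega)
      rw [show k + (s + 1) = k + 1 + s by omega]
      rw [hrec]
      have hrest : (pvTakeRun c (inp.drop (k + 1))).2 = inp.drop (k + 1 + s) := by
        rw [pvTakeRun_drop, List.drop_drop]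
      have hsB : pvStepB (inp.drop k) =
          (PySem.Int.toStr ((s + 1 : Nat) : Int)).toList ++ [c] ++ pvStepB (inp.drop (k + 1 + s)) := by
        rw [hdk, pvStepB_cons, ← hs, hrest]
      rw [hsB]
      simp

theorem pvStep_eq (inp : List Char) : pvStepA inp = pvStepB inp := by
  unfold pvStepA
  rw [List.range_eq_range']
  rw [show inp.length = inp.length - 0 from rfl]
  rw [pvFold_main inp (inp.length - 0) 0 [] rfl (Nat.zero_le _)]
  simp

theorem pvFold_eq (l : List Int) : ∀ inp : List Char,
    l.foldl (fun inp _ => pvStepA inp) inp = l.foldl (fun s _ => pvStepB s) inp := by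
  induction l with
  | nil => intro inp; rfl
  | cons x xs ih =>
    intro inp
    simp only [List.foldl_cons, pvStep_eq]

-- ===== VERDICT (by name: the statement is the Claim_ definition above) =====
theorem do_loop_spec : Claim_equal_do_loop := by
  intro src count _
  unfold Spec_do_loop do_loop do_loop_alt
  rw [pvFold_eq]
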